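-- pv_equiv track=rewrite | github.com/cjhopp/scripts | python/workflow/old_util_2015/indices2hypoDD.py | group_by_heading
-- ===== SOURCE A (Python) =====
-- def group_by_heading(file):
--     buffer = []
--     for line in file:
--         if line.startswith( "#" ):
--             if buffer: yield buffer
--             buffer = [ line ]
--         else:
--             buffer.append( line )
--     yield buffer
-- ===== SOURCE B (Python) =====
-- from itertools import groupby
--
-- def group_by_heading(file):
--     counter = 0
--
--     def key(line):
--         nonlocal counter
--         if line.startswith("#"):
--             counter += 1
--         return counter
--
--     emitted = False
--     for _, group in groupby(file, key):
--         emitted = True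
--         yield list(group)
--     if not emitted:
--         yield []
-- ===== Notes on version B (the rewrite author's own statement) =====
-- stated objective: idiomatic
-- what changed: Replaces the accumulate-and-flush buffer loop with a group-id key function (counter incremented on each '#' heading) fed through itertools.groupby, yielding one empty group only when the input is empty.
import Mathlib
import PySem

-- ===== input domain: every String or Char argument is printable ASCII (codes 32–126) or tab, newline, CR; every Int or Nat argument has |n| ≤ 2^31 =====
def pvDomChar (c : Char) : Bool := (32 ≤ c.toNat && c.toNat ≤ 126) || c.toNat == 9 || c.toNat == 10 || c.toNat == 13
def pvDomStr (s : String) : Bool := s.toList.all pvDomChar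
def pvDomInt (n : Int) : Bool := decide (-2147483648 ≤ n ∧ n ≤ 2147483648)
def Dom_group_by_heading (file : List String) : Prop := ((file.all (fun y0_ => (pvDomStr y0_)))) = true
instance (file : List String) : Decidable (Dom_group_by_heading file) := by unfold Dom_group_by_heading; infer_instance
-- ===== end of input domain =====

-- B replaces A's accumulate-and-flush buffer loop with a group-id key (counter bumped at each '#'
-- heading) fed through itertools.groupby — a more idiomatic decomposition, same O(n) cost.


-- ===== PORT A =====
-- A's generator, as the list of yielded values: accumulate into `buffer`, flush at each '#' line
-- (skipping the flush when the buffer is empty), yield the final buffer at the end.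
def goA (buffer : List String) (file : List String) : List (List String) :=
  match file with
  | [] => [buffer]
  | line :: rest =>
    if PySem.Str.startswith line "#" then
      (if buffer.isEmpty then [] else [buffer]) ++ goA [line] rest
    else
      goA (buffer ++ [line]) rest

def group_by_heading (file : List String) : List (List String) :=
  goA [] file

-- ===== PORT B =====
-- B's key function as a scan: pair every line with its group id (counter bumped at '#').
def keyScan (c : Int) : List String → List (Int × String)
  | [] => []
  | l :: rest =>
    let c' := if PySem.Str.startswith l "#" then c + 1 else c
    (c', l) :: keyScan c' rest

-- itertools.groupby: chunk the keyed list into maximal runs of equal keys.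
def chunkBy : List (Int × String) → List (List (Int × String))
  | [] => []
  | p :: ks =>
    (p :: ks.takeWhile (fun q => q.1 == p.1)) :: chunkBy (ks.dropWhile (fun q => q.1 == p.1))
termination_by ks => ks.length
decreasing_by
  simpa using Nat.lt_succ_of_le (List.length_dropWhile_le _ _)

def group_by_heading_alt (file : List String) : List (List String) :=
  let gs := (chunkBy (keyScan 0 file)).map (fun g => g.map Prod.snd)
  if gs.isEmpty then [[]] else gs

-- ===== PRECONDITION & SPEC =====
def Spec_group_by_heading (file : List String) (out : List (List String)) : Prop := out = group_by_heading_alt file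
instance (file : List String) (out : List (List String)) : Decidable (Spec_group_by_heading file out) := by unfold Spec_group_by_heading; infer_instance

-- ===== CLAIM (what is proved, stated in full; the proofs are below) =====
def Claim_equal_group_by_heading : Prop := ∀ (file : List String), Dom_group_by_heading file → Spec_group_by_heading file (group_by_heading file)

-- ===== LEMMAS AND PROOFS =====

-- "not a heading" predicate
def nh (l : String) : Bool := !(PySem.Str.startswith l "#")

theorem takeWhile_keyScan (rest : List String) (c : Int) :
    (keyScan c rest).takeWhile (fun q => q.1 == c) = (rest.takeWhile nh).map (fun l => (c, l)) := by
  induction rest with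
  | nil => simp [keyScan]
  | cons l rs ih =>
    by_cases h : PySem.Chars.startswith l.toList ['#'] = true
    · have : ((c + 1 : Int) == c) = false := by simp
      simp [keyScan, h, nh, List.takeWhile_cons, this]
    · simp [keyScan, h, nh, List.takeWhile_cons, ih]

theorem dropWhile_keyScan (rest : List String) (c : Int) :
    (keyScan c rest).dropWhile (fun q => q.1 == c) = keyScan c (rest.dropWhile nh) := by
  induction rest with
  | nil => simp [keyScan]
  | cons l rs ih =>
    by_cases h : PySem.Chars.startswith l.toList ['#'] = true
    · have : ((c + 1 : Int) == c) = false := by simp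
      simp [keyScan, h, nh, List.dropWhile_cons, this]
    · simp [keyScan, h, nh, List.dropWhile_cons, ih]

-- A's loop skips forward over the non-heading prefix, absorbing it into the buffer.
theorem goA_skip (file : List String) (buf : List String) :
    goA buf file = goA (buf ++ file.takeWhile nh) (file.dropWhile nh) := by
  induction file generalizing buf with
  | nil => simp
  | cons l rs ih =>
    by_cases h : PySem.Chars.startswith l.toList ['#'] = true
    · simp [nh, h, List.takeWhile_cons, List.dropWhile_cons]
    · simp [goA, nh, h, List.takeWhile_cons, List.dropWhile_cons, ih (buf ++ [l])]

-- the head of the dropWhile remainder fails the predicate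
theorem head_dropWhile {p : String → Bool} {file : List String} {l : String} {rs : List String}
    (h : file.dropWhile p = l :: rs) : p l = false := by
  induction file with
  | nil => simp at h
  | cons a as ih =>
    by_cases ha : p a
    · exact ih (by simpa [List.dropWhile_cons, ha] using h)
    · rw [List.dropWhile_cons] at h
      simp [ha] at h
      rw [← h.1]
      simpa using ha

-- Main invariant: with a nonempty buffer, A's loop produces the buffer extended by the
-- non-heading prefix, followed by B's groups of the remainder (any starting counter c).
theorem main_inv (n : ℕ) (file : List String) (hn : file.length ≤ n) (c : Int)
    (buf : List String) (hb : buf ≠ []) :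
    goA buf file = (buf ++ file.takeWhile nh) ::
      (chunkBy (keyScan c (file.dropWhile nh))).map (fun g => g.map Prod.snd) := by
  induction n generalizing file c buf with
  | zero =>
    have : file = [] := List.eq_nil_of_length_eq_zero (Nat.le_zero.mp hn)
    subst this; simp [goA, keyScan, chunkBy]
  | succ n ih =>
    rw [goA_skip]
    cases hd : file.dropWhile nh with
    | nil => simp [goA, keyScan, chunkBy]
    | cons l rs =>
      have hl : nh l = false := head_dropWhile hd
      have hstart : PySem.Chars.startswith l.toList ['#'] = true := by
        simpa [nh] using hl
      have hbuf' : (buf ++ file.takeWhile nh).isEmpty = false := by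
        cases buf with
        | nil => exact absurd rfl hb
        | cons b bs => simp
      have hlen : rs.length ≤ n := by
        have h1 : (file.dropWhile nh).length ≤ file.length := List.length_dropWhile_le _ _
        rw [hd] at h1
        simp at h1
        omega
      rw [goA]
      simp only [PySem.Str.startswith_eq, hstart, if_true, hbuf']
      rw [keyScan]
      simp only [PySem.Str.startswith_eq, hstart, if_true]
      rw [chunkBy, takeWhile_keyScan, dropWhile_keyScan]
      rw [ih rs hlen (c + 1) [l] (by simp)]
      simp [hstart]

-- ===== VERDICT (by name: the statement is the Claim_ definition above) =====
theorem group_by_heading_spec : Claim_equal_group_by_heading := by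
  intro file _
  show group_by_heading file = group_by_heading_alt file
  cases file with
  | nil => simp [group_by_heading, group_by_heading_alt, goA, keyScan, chunkBy]
  | cons l rs =>
    by_cases h : PySem.Chars.startswith l.toList ['#'] = true
    · have hA : group_by_heading (l :: rs) = goA [l] rs := by
        simp [group_by_heading, goA, h]
      rw [hA, main_inv rs.length rs le_rfl 1 [l] (by simp)]
      simp only [group_by_heading_alt, keyScan, PySem.Str.startswith_eq, h, if_true]
      rw [chunkBy, takeWhile_keyScan, dropWhile_keyScan]
      simp [h]
    · have hA : group_by_heading (l :: rs) = goA [l] rs := by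
        simp [group_by_heading, goA, h]
      rw [hA, main_inv rs.length rs le_rfl 0 [l] (by simp)]
      simp only [group_by_heading_alt, keyScan, PySem.Str.startswith_eq, eq_self_iff_true, h, if_false]
      rw [chunkBy, takeWhile_keyScan, dropWhile_keyScan]
      simp [h]
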